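-- pv_equiv track=rewrite | github.com/zeeneddie/Sports-League-Management-System | hollandsevelden.py | _find_team_in_matrix
-- ===== SOURCE A (Python) =====
-- def _find_team_in_matrix(team_name, teams_list):
--     """Find matching team name (case-insensitive, partial match)"""
--     if not team_name:
--         return None
--     team_clean = team_name.strip().lower()
--     # First try exact match
--     for team in teams_list:
--         if team.strip().lower() == team_clean:
--             return team
--     # Then try partial match
--     for team in teams_list:
--         if team_clean in team.strip().lower() or team.strip().lower() in team_clean:
--             return team
--     return None
-- ===== SOURCE B (Python) =====
-- def _find_team_in_matrix(team_name, teams_list):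
--     """Find matching team name (case-insensitive, partial match)"""
--     if not team_name:
--         return None
--     team_clean = team_name.strip().lower()
--     fallback = None
--     for team in teams_list:
--         t = team.strip().lower()
--         if t == team_clean:
--             return team
--         if (team_clean in t or t in team_clean) and fallback is None:
--             fallback = team
--     return fallback
-- ===== Notes on version B (the rewrite author's own statement) =====
-- stated objective: alternative
-- what changed: Replaces A's two full passes (exact pass, then partial pass) with a single pass that returns on the first exact match and remembers the first partial candidate as a fallback, normalizing each team only once per element.
import Mathlib
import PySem

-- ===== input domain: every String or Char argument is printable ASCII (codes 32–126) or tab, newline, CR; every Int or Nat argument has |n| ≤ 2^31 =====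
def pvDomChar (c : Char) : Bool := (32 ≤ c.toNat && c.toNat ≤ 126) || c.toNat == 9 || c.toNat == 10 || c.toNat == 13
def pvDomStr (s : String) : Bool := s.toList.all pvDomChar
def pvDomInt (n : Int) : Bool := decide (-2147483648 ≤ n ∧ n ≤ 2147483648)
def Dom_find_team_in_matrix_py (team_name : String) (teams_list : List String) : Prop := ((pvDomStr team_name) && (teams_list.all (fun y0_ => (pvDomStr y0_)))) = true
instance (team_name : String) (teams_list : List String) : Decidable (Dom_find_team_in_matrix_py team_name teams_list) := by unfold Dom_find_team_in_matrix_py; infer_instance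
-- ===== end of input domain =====

-- B replaces A's two full passes with a single pass: return on the first exact match,
-- remember the first partial candidate as fallback (alternative decomposition, same cost).


-- ===== PORT A =====
-- normalisation team.strip().lower(), shared by both ports
def pvNorm (s : String) : String := PySem.Str.lower (PySem.Str.strip s)

-- first loop of A: exact match
def pvExactLoop (tc : String) : List String → Option String
  | [] => none
  | t :: ts => if pvNorm t = tc then some t else pvExactLoop tc ts

-- second loop of A: partial match
def pvPartialLoop (tc : String) : List String → Option String
  | [] => none
  | t :: ts =>
      if PySem.Str.isIn tc (pvNorm t) || PySem.Str.isIn (pvNorm t) tc then some t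
      else pvPartialLoop tc ts

def find_team_in_matrix_py (team_name : String) (teams_list : List String) : Option String :=
  if team_name = "" then none
  else
    let team_clean := PySem.Str.lower (PySem.Str.strip team_name)
    match pvExactLoop team_clean teams_list with
    | some t => some t
    | none => pvPartialLoop team_clean teams_list

-- ===== PORT B =====
-- single pass: return on exact match; keep the FIRST partial candidate in `fallback`
def pvScan (tc : String) (fallback : Option String) : List String → Option String
  | [] => fallback
  | team :: ts =>
      let t := pvNorm team
      if t = tc then some team
      else
        pvScan tc
          (if (PySem.Str.isIn tc t || PySem.Str.isIn t tc) && fallback.isNone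
           then some team else fallback) ts

def find_team_in_matrix_py_alt (team_name : String) (teams_list : List String) : Option String :=
  if team_name = "" then none
  else pvScan (PySem.Str.lower (PySem.Str.strip team_name)) none teams_list

-- ===== PRECONDITION & SPEC =====
def Spec_find_team_in_matrix_py (team_name : String) (teams_list : List String) (out : Option String) : Prop := out = find_team_in_matrix_py_alt team_name teams_list
instance (team_name : String) (teams_list : List String) (out : Option String) : Decidable (Spec_find_team_in_matrix_py team_name teams_list out) := by unfold Spec_find_team_in_matrix_py; infer_instance

-- ===== CLAIM (what is proved, stated in full; the proofs are below) =====
def Claim_equal_find_team_in_matrix_py : Prop := ∀ (team_name : String) (teams_list : List String), Dom_find_team_in_matrix_py team_name teams_list → Spec_find_team_in_matrix_py team_name teams_list (find_team_in_matrix_py team_name teams_list)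

-- ===== LEMMAS AND PROOFS =====
theorem pvScan_eq (tc : String) (l : List String) (fb : Option String) :
    pvScan tc fb l =
      match pvExactLoop tc l with
      | some t => some t
      | none => fb.or (pvPartialLoop tc l) := by
  induction l generalizing fb with
  | nil => cases fb <;> simp [pvScan, pvExactLoop, pvPartialLoop]
  | cons t ts ih =>
      simp only [pvScan, pvExactLoop, pvPartialLoop]
      by_cases h : pvNorm t = tc
      · simp [h]
      · simp only [h, ih]
        cases fb with
        | none =>
            simp only [Option.isNone_none, Bool.and_true]
            by_cases hc : (PySem.Str.isIn tc (pvNorm t) || PySem.Str.isIn (pvNorm t) tc) = true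
            · simp only [hc, if_pos hc]
              cases pvExactLoop tc ts <;> simp
            · simp only [hc, if_neg hc]
              cases pvExactLoop tc ts <;> simp
        | some x =>
            simp only [Option.isNone_some, Bool.and_false, if_neg Bool.false_ne_true]
            cases pvExactLoop tc ts <;> simp

theorem find_team_in_matrix_py_spec : Claim_equal_find_team_in_matrix_py := by
  intro team_name teams_list _
  unfold Spec_find_team_in_matrix_py find_team_in_matrix_py find_team_in_matrix_py_alt
  by_cases h : team_name = ""
  · simp [h]
  · simp only [h, pvScan_eq]
    cases pvExactLoop (PySem.Str.lower (PySem.Str.strip team_name)) teams_list <;> simp
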